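-- pv_equiv track=rewrite | github.com/Luxar3-cmd/INF221-Informe-2 | Costos/matriz_costos.py | create_cost_matrix
-- ===== SOURCE A (Python) =====
-- def create_cost_matrix(cost):
--     cost_matrix = [[0 for _ in range(26)] for _ in range(26)]
--
--     # Inicializar la matriz de costos con el costo de sustitución parametrizable
--     for i in range(26):
--         for j in range(26):
--             if i == j:
--                 cost_matrix[i][j] = 0  # No hay costo si es la misma letra
--             else:
--                 cost_matrix[i][j] = cost  # Costo de sustitución parametrizado
--     return cost_matrix
-- ===== SOURCE B (Python) =====
-- def create_cost_matrix(cost):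
--     # One prototype row with 0 at position 0; row i is that row rotated right by i.
--     base = [0] + [cost] * 25
--     return [base[26 - i:] + base[:26 - i] for i in range(26)]
-- ===== Notes on version B (the rewrite author's own statement) =====
-- stated objective: alternative
-- what changed: Instead of a nested per-cell if/else loop over every cell of the matrix, B builds a single prototype row (zero followed by cost repeated) and generates each row by rotating that prototype right by its index via slicing.
import Mathlib
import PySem

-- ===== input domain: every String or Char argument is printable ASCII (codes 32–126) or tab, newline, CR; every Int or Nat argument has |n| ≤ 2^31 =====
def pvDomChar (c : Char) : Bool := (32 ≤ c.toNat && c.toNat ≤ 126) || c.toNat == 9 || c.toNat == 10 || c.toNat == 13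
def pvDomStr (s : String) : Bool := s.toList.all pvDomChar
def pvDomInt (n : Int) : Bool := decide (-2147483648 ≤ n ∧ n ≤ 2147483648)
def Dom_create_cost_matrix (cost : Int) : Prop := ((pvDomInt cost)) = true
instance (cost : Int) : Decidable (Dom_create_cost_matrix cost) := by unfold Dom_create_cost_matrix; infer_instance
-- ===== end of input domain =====

-- B builds one prototype row [0, cost, ..., cost] and produces each row i by rotating it
-- right by i via slicing — an alternative decomposition with an identical return value.


-- ===== PORT A =====
def create_cost_matrix (cost : Int) : List (List Int) :=
  -- cost_matrix = [[0 for _ in range(26)] for _ in range(26)]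
  let m0 := (PySem.List.pyRange 0 26 1).map (fun _ => (PySem.List.pyRange 0 26 1).map (fun _ => (0 : Int)))
  -- for i in range(26): for j in range(26): cost_matrix[i][j] = 0 if i == j else cost
  (PySem.List.pyRange 0 26 1).foldl (fun m i =>
    (PySem.List.pyRange 0 26 1).foldl (fun m j =>
      m.set i.toNat ((m.getD i.toNat []).set j.toNat (if i = j then 0 else cost))) m) m0

-- ===== PORT B =====
def create_cost_matrix_alt (cost : Int) : List (List Int) :=
  -- base = [0] + [cost] * 25
  let base : List Int := [0] ++ List.replicate 25 cost
  -- [base[26 - i:] + base[:26 - i] for i in range(26)]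
  (PySem.List.pyRange 0 26 1).map (fun i =>
    PySem.List.slice base (some (26 - i)) none ++ PySem.List.slice base none (some (26 - i)))

-- ===== PRECONDITION & SPEC =====
def Spec_create_cost_matrix (cost : Int) (out : List (List Int)) : Prop := out = create_cost_matrix_alt cost
instance (cost : Int) (out : List (List Int)) : Decidable (Spec_create_cost_matrix cost out) := by unfold Spec_create_cost_matrix; infer_instance

-- ===== CLAIM (what is proved, stated in full; the proofs are below) =====
def Claim_equal_create_cost_matrix : Prop := ∀ (cost : Int), Dom_create_cost_matrix cost → Spec_create_cost_matrix cost (create_cost_matrix cost)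

-- ===== LEMMAS AND PROOFS =====

-- length of a row is preserved by a fold of sets
theorem pv_len_foldl_set (v : Nat → Int) (js : List Nat) :
    ∀ (r : List Int), (js.foldl (fun r j => r.set j (v j)) r).length = r.length := by
  induction js with
  | nil => intro r; rfl
  | cons j rest ih => intro r; simpa [List.foldl_cons] using ih (r.set j (v j))

-- entry of a row after a fold of sets
theorem pv_getElem_foldl_set (v : Nat → Int) (js : List Nat) :
    ∀ (r : List Int) (k : Nat) (hk : k < r.length),
      (js.foldl (fun r j => r.set j (v j)) r)[k]'(by rw [pv_len_foldl_set]; exact hk)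
        = if k ∈ js then v k else r[k] := by
  induction js with
  | nil => intro r k hk; simp
  | cons j rest ih =>
    intro r k hk
    simp only [List.foldl_cons]
    rw [ih (r.set j (v j)) k (by simpa using hk)]
    by_cases hkr : k ∈ rest
    · simp [hkr]
    · by_cases hkj : k = j
      · subst hkj; simp [hkr]
      · simp [hkj, Ne.symm hkj]

-- a fold that repeatedly writes row i collapses to one write of the inner fold's result
theorem pv_foldl_row_collapse (i : Nat) (v : Nat → Int) (js : List Nat) :
    ∀ (m : List (List Int)),
      js.foldl (fun m j => m.set i ((m.getD i []).set j (v j))) m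
        = m.set i (js.foldl (fun r j => r.set j (v j)) (m.getD i [])) := by
  induction js with
  | nil =>
    intro m
    show m = m.set i (m.getD i [])
    by_cases hi : i < m.length
    · simp [List.getD, List.getElem?_eq_getElem hi, List.set_getElem_self]
    · exact (List.set_eq_of_length_le (by omega)).symm
  | cons j rest ih =>
    intro m
    simp only [List.foldl_cons]
    rw [ih (m.set i ((m.getD i []).set j (v j)))]
    by_cases hi : i < m.length
    · have hg : (m.set i ((m.getD i []).set j (v j))).getD i [] = (m.getD i []).set j (v j) := by
        simp [List.getD, hi]
      rw [hg, List.set_set]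
    · have h1 : m.set i ((m.getD i []).set j (v j)) = m := List.set_eq_of_length_le (by omega)
      have h0 : m.getD i [] = ([] : List Int) := by
        simp [List.getD, List.getElem?_eq_none (by omega : m.length ≤ i)]
      rw [h1, h0]
      have h2 : ([] : List Int).set j (v j) = [] := by simp
      rw [h2]

-- length is preserved by the outer fold of row updates
theorem pv_len_foldl_rows (g : Nat → List Int → List Int) (is : List Nat) :
    ∀ (m : List (List Int)), (is.foldl (fun m i => m.set i (g i (m.getD i []))) m).length = m.length := by
  induction is with
  | nil => intro m; rfl
  | cons i rest ih => intro m; simpa using ih (m.set i (g i (m.getD i [])))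

-- row k after the outer fold of row updates over distinct in-range indices
theorem pv_getElem_foldl_rows (g : Nat → List Int → List Int) (is : List Nat) :
    ∀ (m : List (List Int)), is.Nodup → (∀ i ∈ is, i < m.length) →
      ∀ (k : Nat) (hk : k < m.length),
        (is.foldl (fun m i => m.set i (g i (m.getD i []))) m)[k]'(by rw [pv_len_foldl_rows]; exact hk)
          = if k ∈ is then g k (m[k]) else m[k] := by
  induction is with
  | nil => intro m _ _ k hk; simp
  | cons i rest ih =>
    intro m hnd hlt k hk
    simp only [List.foldl_cons]
    have hi : i < m.length := hlt i (by simp)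
    have hset : ∀ j ∈ rest, j < (m.set i (g i (m.getD i []))).length := by
      intro j hj; simpa using hlt j (by simp [hj])
    rw [ih (m.set i (g i (m.getD i []))) hnd.of_cons hset k (by simpa using hk)]
    by_cases hkr : k ∈ rest
    · have hki : k ≠ i := by rintro rfl; exact (List.nodup_cons.mp hnd).1 hkr
      simp [hkr, Ne.symm hki]
    · by_cases hki : k = i
      · subst hki
        simp [hkr, List.getD, List.getElem?_eq_getElem hk]
      · simp [hkr, hki, Ne.symm hki]

-- the common value both ports compute
def pv_target (cost : Int) : List (List Int) :=
  (List.range 26).map (fun k => (List.range 26).map (fun l => if k = l then (0 : Int) else cost))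

theorem pv_pyRange26 : PySem.List.pyRange 0 26 1 = (List.range 26).map (fun k => ((k : Nat) : Int)) := by decide

theorem pv_A_eq_target (cost : Int) : create_cost_matrix cost = pv_target cost := by
  unfold create_cost_matrix
  rw [pv_pyRange26]
  simp only [List.foldl_map, Int.toNat_natCast, Nat.cast_inj]
  have hcollapse : ∀ (m : List (List Int)) (i : Nat),
      (List.range 26).foldl (fun m l => m.set i ((m.getD i []).set l (if i = l then 0 else cost))) m
        = m.set i ((List.range 26).foldl (fun r l => r.set l (if i = l then 0 else cost)) (m.getD i [])) :=
    fun m i => pv_foldl_row_collapse i (fun l => if i = l then 0 else cost) (List.range 26) m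
  simp only [hcollapse]
  have hm0len : (((List.range 26).map (fun k => ((k : Nat) : Int))).map
      (fun _ => ((List.range 26).map (fun k => ((k : Nat) : Int))).map (fun _ => (0 : Int)))).length = 26 := by
    simp
  refine List.ext_getElem ?_ ?_
  · simp only [pv_len_foldl_rows (fun i r => (List.range 26).foldl
      (fun r l => r.set l (if i = l then 0 else cost)) r) (List.range 26)]
    simp [pv_target]
  · intro k h1 h2
    have hk : k < 26 := by simpa [pv_target] using h2
    rw [List.getElem_of_eq rfl]
    simp only [pv_getElem_foldl_rows (fun i r => (List.range 26).foldl
        (fun r l => r.set l (if i = l then 0 else cost)) r) (List.range 26) _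
        List.nodup_range (by intro i hi; rw [hm0len]; exact List.mem_range.mp hi) k (by rw [hm0len]; exact hk)]
    rw [if_pos (List.mem_range.mpr hk)]
    have hrow : (((List.range 26).map (fun k => ((k : Nat) : Int))).map
        (fun _ => ((List.range 26).map (fun k => ((k : Nat) : Int))).map (fun _ => (0 : Int))))[k]'(by rw [hm0len]; exact hk)
        = ((List.range 26).map (fun k => ((k : Nat) : Int))).map (fun _ => (0 : Int)) := by
      simp
    rw [hrow]
    refine List.ext_getElem ?_ ?_
    · simp only [pv_len_foldl_set (fun l => if k = l then 0 else cost) (List.range 26)]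
      simp [pv_target]
    · intro l hl1 hl2
      have hl : l < 26 := by simpa [pv_target, hk] using hl2
      simp only [pv_getElem_foldl_set (fun l => if k = l then 0 else cost) (List.range 26)
        (((List.range 26).map (fun k => ((k : Nat) : Int))).map (fun _ => (0 : Int))) l (by simpa using hl)]
      rw [if_pos (List.mem_range.mpr hl)]
      simp [pv_target]

theorem pv_B_eq_target (cost : Int) : create_cost_matrix_alt cost = pv_target cost := by
  unfold create_cost_matrix_alt pv_target
  rw [pv_pyRange26]
  rw [List.map_map]
  refine List.map_congr_left ?_
  intro k hk
  have hk26 : k < 26 := List.mem_range.mp hk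
  interval_cases k <;> rfl

-- ===== VERDICT (by name: the statement is the Claim_ definition above) =====
theorem create_cost_matrix_spec : Claim_equal_create_cost_matrix := by
  intro cost _
  unfold Spec_create_cost_matrix
  rw [pv_A_eq_target, pv_B_eq_target]
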